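-- pv_equiv track=rewrite | github.com/andriy41/andry | src/models/advanced_system/advanced_model.py | _get_feature_category
-- ===== SOURCE A (Python) =====
-- def _get_feature_category(feature: str) -> str:
--     """Determine category for a given feature"""
--     if any(
--         x in feature for x in ["points_per_game", "passing", "rushing", "qb_rating"]
--     ):
--         return "basic_offense"
--     elif any(x in feature for x in ["dvoa", "success_rate", "explosive_play_rate"]):
--         return "advanced_offense"
--     elif any(x in feature for x in ["defense", "pressure_rate", "stuff_rate"]):
--         return "advanced_defense"
--     elif any(x in feature for x in ["third_down", "red_zone", "goal_line"]):
--         return "situational"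
--     elif any(x in feature for x in ["per_drive", "drive_success"]):
--         return "drive_efficiency"
--     elif any(
--         x in feature for x in ["win_pct", "power_index", "playoff_probability"]
--     ):
--         return "team_success"
--     elif any(x in feature for x in ["form", "trend", "streak", "recent"]):
--         return "momentum"
--     elif any(
--         x in feature for x in ["division", "conference", "playoff_implications"]
--     ):
--         return "game_context"
--     elif any(x in feature for x in ["injury", "availability"]):
--         return "player_availability"
--     elif any(x in feature for x in ["temperature", "wind", "precipitation"]):
--         return "environmental"
--     elif any(x in feature for x in ["spread", "betting", "line_movement"]):
--         return "market"
--     else: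
--         return "advanced_analytics"
-- ===== SOURCE B (Python) =====
-- # Inverted index: pattern -> (priority, category).  Instead of a first-match
-- # cascade over category groups, scan ALL patterns once and keep the match with
-- # the smallest priority (strict < keeps the earliest on equal priority, so the
-- # original group/within-group order is irrelevant to correctness).
-- PATTERN_INDEX = {
--     "points_per_game": (0, "basic_offense"),
--     "passing": (0, "basic_offense"),
--     "rushing": (0, "basic_offense"),
--     "qb_rating": (0, "basic_offense"),
--     "dvoa": (1, "advanced_offense"),
--     "success_rate": (1, "advanced_offense"),
--     "explosive_play_rate": (1, "advanced_offense"),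
--     "defense": (2, "advanced_defense"),
--     "pressure_rate": (2, "advanced_defense"),
--     "stuff_rate": (2, "advanced_defense"),
--     "third_down": (3, "situational"),
--     "red_zone": (3, "situational"),
--     "goal_line": (3, "situational"),
--     "per_drive": (4, "drive_efficiency"),
--     "drive_success": (4, "drive_efficiency"),
--     "win_pct": (5, "team_success"),
--     "power_index": (5, "team_success"),
--     "playoff_probability": (5, "team_success"),
--     "form": (6, "momentum"),
--     "trend": (6, "momentum"),
--     "streak": (6, "momentum"),
--     "recent": (6, "momentum"),
--     "division": (7, "game_context"),
--     "conference": (7, "game_context"),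
--     "playoff_implications": (7, "game_context"),
--     "injury": (8, "player_availability"),
--     "availability": (8, "player_availability"),
--     "temperature": (9, "environmental"),
--     "wind": (9, "environmental"),
--     "precipitation": (9, "environmental"),
--     "spread": (10, "market"),
--     "betting": (10, "market"),
--     "line_movement": (10, "market"),
-- }
--
-- def _get_feature_category(feature: str) -> str:
--     """Determine category for a given feature (min-priority over all matches)."""
--     best = None
--     for pattern, (prio, cat) in PATTERN_INDEX.items():
--         if pattern in feature and (best is None or prio < best[0]):
--             best = (prio, cat)
--     return best[1] if best is not None else "advanced_analytics"
-- ===== Notes on version B (the rewrite author's own statement) =====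
-- stated objective: alternative
-- what changed: Replaces the first-match if/elif cascade over category groups with an inverted pattern->(priority,category) index scanned exhaustively while keeping the minimum-priority match (no early return, no group structure).
import Mathlib
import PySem

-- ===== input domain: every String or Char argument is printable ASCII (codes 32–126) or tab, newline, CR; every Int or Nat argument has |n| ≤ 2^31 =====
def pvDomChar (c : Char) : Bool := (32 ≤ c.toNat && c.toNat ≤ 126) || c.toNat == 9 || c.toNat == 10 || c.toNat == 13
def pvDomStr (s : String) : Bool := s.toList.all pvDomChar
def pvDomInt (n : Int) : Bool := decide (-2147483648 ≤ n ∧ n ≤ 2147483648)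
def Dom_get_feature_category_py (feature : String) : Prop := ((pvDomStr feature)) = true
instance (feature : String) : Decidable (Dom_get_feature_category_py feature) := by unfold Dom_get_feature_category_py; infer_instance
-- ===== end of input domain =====

-- B replaces A's first-match if/elif cascade with an inverted pattern -> (priority, category)
-- index scanned exhaustively, keeping the minimum-priority match; objective: alternative.

-- ===== PORT A =====
-- A's if/elif chain, branch for branch; 'x in feature' is PySem.Str.isIn.
def get_feature_category_py (feature : String) : String :=
  if ["points_per_game", "passing", "rushing", "qb_rating"].any (fun x => PySem.Str.isIn x feature) then
    "basic_offense"
  else if ["dvoa", "success_rate", "explosive_play_rate"].any (fun x => PySem.Str.isIn x feature) then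
    "advanced_offense"
  else if ["defense", "pressure_rate", "stuff_rate"].any (fun x => PySem.Str.isIn x feature) then
    "advanced_defense"
  else if ["third_down", "red_zone", "goal_line"].any (fun x => PySem.Str.isIn x feature) then
    "situational"
  else if ["per_drive", "drive_success"].any (fun x => PySem.Str.isIn x feature) then
    "drive_efficiency"
  else if ["win_pct", "power_index", "playoff_probability"].any (fun x => PySem.Str.isIn x feature) then
    "team_success"
  else if ["form", "trend", "streak", "recent"].any (fun x => PySem.Str.isIn x feature) then
    "momentum"
  else if ["division", "conference", "playoff_implications"].any (fun x => PySem.Str.isIn x feature) then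
    "game_context"
  else if ["injury", "availability"].any (fun x => PySem.Str.isIn x feature) then
    "player_availability"
  else if ["temperature", "wind", "precipitation"].any (fun x => PySem.Str.isIn x feature) then
    "environmental"
  else if ["spread", "betting", "line_movement"].any (fun x => PySem.Str.isIn x feature) then
    "market"
  else
    "advanced_analytics"

-- ===== PORT B =====
-- B's inverted index (dict in insertion order): pattern -> (priority, category).
def pvPatternIndex : List (String × Int × String) :=
  [("points_per_game", 0, "basic_offense"),
   ("passing", 0, "basic_offense"),
   ("rushing", 0, "basic_offense"),
   ("qb_rating", 0, "basic_offense"),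
   ("dvoa", 1, "advanced_offense"),
   ("success_rate", 1, "advanced_offense"),
   ("explosive_play_rate", 1, "advanced_offense"),
   ("defense", 2, "advanced_defense"),
   ("pressure_rate", 2, "advanced_defense"),
   ("stuff_rate", 2, "advanced_defense"),
   ("third_down", 3, "situational"),
   ("red_zone", 3, "situational"),
   ("goal_line", 3, "situational"),
   ("per_drive", 4, "drive_efficiency"),
   ("drive_success", 4, "drive_efficiency"),
   ("win_pct", 5, "team_success"),
   ("power_index", 5, "team_success"),
   ("playoff_probability", 5, "team_success"),
   ("form", 6, "momentum"),
   ("trend", 6, "momentum"),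
   ("streak", 6, "momentum"),
   ("recent", 6, "momentum"),
   ("division", 7, "game_context"),
   ("conference", 7, "game_context"),
   ("playoff_implications", 7, "game_context"),
   ("injury", 8, "player_availability"),
   ("availability", 8, "player_availability"),
   ("temperature", 9, "environmental"),
   ("wind", 9, "environmental"),
   ("precipitation", 9, "environmental"),
   ("spread", 10, "market"),
   ("betting", 10, "market"),
   ("line_movement", 10, "market")]

-- one iteration of B's loop: replace `best` iff the pattern matches and beats it strictly.
def pvBestStep (feature : String) (best : Option (Int × String)) (e : String × Int × String)
    : Option (Int × String) :=
  if PySem.Str.isIn e.1 feature &&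
       (match best with
        | none => true
        | some (q, _) => decide (e.2.1 < q)) then
    some (e.2.1, e.2.2)
  else best

def get_feature_category_py_alt (feature : String) : String :=
  match pvPatternIndex.foldl (pvBestStep feature) none with
  | some (_, c) => c
  | none => "advanced_analytics"

-- ===== PRECONDITION & SPEC =====
def Spec_get_feature_category_py (feature : String) (out : String) : Prop := out = get_feature_category_py_alt feature
instance (feature : String) (out : String) : Decidable (Spec_get_feature_category_py feature out) := by unfold Spec_get_feature_category_py; infer_instance

-- ===== CLAIM (what is proved, stated in full; the proofs are below) =====
def Claim_equal_get_feature_category_py : Prop := ∀ (feature : String), Dom_get_feature_category_py feature → Spec_get_feature_category_py feature (get_feature_category_py feature)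

-- ===== LEMMAS AND PROOFS =====

-- proof-side reference: first matching entry's category (default at the end).
def pvFirstCat (feature : String) : List (String × Int × String) → String
  | [] => "advanced_analytics"
  | e :: rest => if PySem.Str.isIn e.1 feature then e.2.2 else pvFirstCat feature rest

-- once `best` holds a priority ≤ every remaining priority, the fold never changes it.
theorem pvBest_keep (feature : String) (l : List (String × Int × String)) (q : Int) (c : String)
    (h : ∀ e ∈ l, q ≤ e.2.1) :
    l.foldl (pvBestStep feature) (some (q, c)) = some (q, c) := by
  induction l with
  | nil => rfl
  | cons e rest ih =>
      have hq : q ≤ e.2.1 := h e (List.mem_cons_self ..)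
      have hstep : pvBestStep feature (some (q, c)) e = some (q, c) := by
        unfold pvBestStep
        have : decide (e.2.1 < q) = false := by simp; omega
        simp [this]
      rw [List.foldl_cons, hstep]
      exact ih (fun x hx => h x (List.mem_cons_of_mem _ hx))

-- on a priority-nondecreasing list, min-scan from none = first match.
theorem pvBest_eq_first (feature : String) (l : List (String × Int × String))
    (h : l.Pairwise (fun a b => a.2.1 ≤ b.2.1)) :
    (match l.foldl (pvBestStep feature) none with
     | some (_, c) => c
     | none => "advanced_analytics") = pvFirstCat feature l := by
  induction l with
  | nil => rfl
  | cons e rest ih =>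
      rcases List.pairwise_cons.mp h with ⟨h1, h2⟩
      by_cases hm : PySem.Str.isIn e.1 feature
      · have hm' : PySem.Chars.isIn e.1.toList feature.toList = true := by
          simpa using hm
        have hstep : pvBestStep feature none e = some (e.2.1, e.2.2) := by
          unfold pvBestStep; simp [hm']
        rw [List.foldl_cons, hstep,
            pvBest_keep feature rest e.2.1 e.2.2 (fun x hx => h1 x hx)]
        simp [pvFirstCat, hm']
      · have hm' : PySem.Chars.isIn e.1.toList feature.toList = false := by
          simpa using hm
        have hstep : pvBestStep feature none e = none := by
          unfold pvBestStep; simp [hm']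
        rw [List.foldl_cons, hstep]
        simpa [pvFirstCat, hm'] using ih h2

-- collapse consecutive branches with the same result into a disjunction.
theorem pv_if_or {α : Type} (a b : Bool) (x y : α) :
    (if (a || b) then x else y) = (if a then x else if b then x else y) := by
  cases a <;> simp

-- ===== VERDICT (by name: the statement is the Claim_ definition above) =====
theorem get_feature_category_py_spec : Claim_equal_get_feature_category_py := by
  intro feature _
  unfold Spec_get_feature_category_py get_feature_category_py_alt
  have hsorted : pvPatternIndex.Pairwise (fun a b => a.2.1 ≤ b.2.1) := by decide
  rw [pvBest_eq_first feature pvPatternIndex hsorted]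
  unfold get_feature_category_py pvPatternIndex
  simp only [pvFirstCat, List.any_cons, List.any_nil, Bool.or_false, pv_if_or]
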